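-- pv_equiv track=rewrite | github.com/mirenk0/Algorithmic-Problems | 9-Search_Problems/brackets.py | count
-- ===== SOURCE A (Python) =====
-- import itertools
--
-- def count(n, k):
--     def is_balanced(s):
--         stack = []
--         for c in s:
--             if c == '(':
--                 stack.append(c)
--             elif c == ')':
--                 if not stack:
--                     return False
--                 stack.pop()
--         return not stack
--
--     def has_at_most_k_nested(s):
--         stack = []
--         max_nested = 0
--         for c in s:
--             if c == '(':
--                 stack.append(c)
--                 max_nested = max(max_nested, len(stack))
--             elif c == ')':
--                 stack.pop()
--         return max_nested <= k
--
--     count = 0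
--     for s in itertools.product('()', repeat=n):
--         s = ''.join(s)
--         if is_balanced(s) and has_at_most_k_nested(s):
--             count += 1
--     return count
-- ===== SOURCE B (Python) =====
-- def count(n, k):
--     if n < 0:
--         return 0
--     if k < 0:
--         return 0
--     m = min(k, n // 2)
--     dp = [1 if d == 0 else 0 for d in range(m + 1)]
--     for _ in range(n):
--         dp = [(dp[d - 1] if 1 <= d else 0) + (dp[d + 1] if d + 1 <= m else 0)
--               for d in range(m + 1)]
--     return dp[0]
-- ===== Notes on version B (the rewrite author's own statement) =====
-- stated objective: faster
-- what changed: Replaced brute-force enumeration of all 2^n bracket strings by a dynamic program over (position, current depth) counting depth-bounded Dyck paths; intended as faster (measured: A timed out at n=16 where B returned instantly, so no clean ratio could be taken).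
-- outside the precondition, e.g. on count(-1, 2): A raises ValueError, B returns 0
import Mathlib
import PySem

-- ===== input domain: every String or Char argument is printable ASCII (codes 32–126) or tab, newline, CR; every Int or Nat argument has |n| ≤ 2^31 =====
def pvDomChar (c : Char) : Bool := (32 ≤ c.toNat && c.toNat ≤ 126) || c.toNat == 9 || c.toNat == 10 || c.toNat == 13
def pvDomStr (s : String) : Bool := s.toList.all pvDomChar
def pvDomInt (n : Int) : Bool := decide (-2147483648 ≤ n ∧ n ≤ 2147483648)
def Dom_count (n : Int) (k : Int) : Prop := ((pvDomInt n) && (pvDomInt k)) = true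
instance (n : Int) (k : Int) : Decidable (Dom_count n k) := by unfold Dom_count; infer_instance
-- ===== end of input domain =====

-- B replaces A's exponential enumeration of all 2^n strings by an O(n·min(k,n)) DP over (position, depth).

-- ===== PORT A =====
-- itertools.product('()', repeat=n) : all length-n sequences over '(' , ')'
def prodRep : Nat → List (List Char)
  | 0 => [[]]
  | m + 1 => ['(', ')'].flatMap (fun c => (prodRep m).map (fun s => c :: s))

-- is_balanced's loop (string chars, stack)
def balLoop : List Char → List Char → Bool
  | [], stack => stack.isEmpty
  | c :: rest, stack =>
    if c = '(' then balLoop rest ('(' :: stack)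
    else if c = ')' then
      match stack with
      | [] => false
      | _ :: t => balLoop rest t
    else balLoop rest stack

-- has_at_most_k_nested's loop (string chars, stack, max_nested); A only calls it on balanced
-- strings, so stack.pop never sees an empty stack (ported as .tail, exact on those inputs)
def maxLoop : List Char → List Char → Nat → Nat
  | [], _, m => m
  | c :: rest, stack, m =>
    if c = '(' then maxLoop rest ('(' :: stack) (max m (stack.length + 1))
    else if c = ')' then maxLoop rest stack.tail m
    else maxLoop rest stack m

def count (n : Int) (k : Int) : Int :=
  (prodRep n.toNat).foldl
    (fun acc s => if balLoop s [] && decide ((maxLoop s [] 0 : Int) ≤ k) then acc + 1 else acc) 0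

-- ===== PORT B =====
def count_alt (n : Int) (k : Int) : Int :=
  if n < 0 then 0
  else if k < 0 then 0
  else
    let mN : Nat := (min k (n / 2)).toNat
    let dp0 : List Int := (List.range (mN + 1)).map (fun d => if d = 0 then 1 else 0)
    let dpN := (List.range n.toNat).foldl
      (fun dp _ => (List.range (mN + 1)).map (fun d =>
        (if 1 ≤ d then dp.getD (d - 1) 0 else 0) +
        (if d + 1 ≤ mN then dp.getD (d + 1) 0 else 0))) dp0
    dpN.getD 0 0

-- ===== PRECONDITION & SPEC =====
-- Pre_ excludes n < 0, where A raises ValueError (itertools.product with negative repeat).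
def Pre_count (n : Int) (k : Int) : Prop := 0 ≤ n
instance (n : Int) (k : Int) : Decidable (Pre_count n k) := by unfold Pre_count; infer_instance
def pvWitness_count : Int × Int := (4, 2)

def Spec_count (n : Int) (k : Int) (out : Int) : Prop := out = count_alt n k
instance (n : Int) (k : Int) (out : Int) : Decidable (Spec_count n k out) := by unfold Spec_count; infer_instance

-- ===== CLAIM (what is proved, stated in full; the proofs are below) =====
def Claim_equal_count : Prop := ∀ (n : Int) (k : Int), Dom_count n k → Pre_count n k → Spec_count n k (count n k)

-- ===== LEMMAS AND PROOFS =====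

-- number of length-i ±1 paths over depths in [0,k], from depth d down to depth 0
def Nk (k : Int) : Nat → Nat → Int
  | 0, d => if d = 0 then 1 else 0
  | i + 1, d => (if (d : Int) + 1 ≤ k then Nk k i (d + 1) else 0) + (if 1 ≤ d then Nk k i (d - 1) else 0)
def okFrom (k : Int) : Nat → List Char → Bool
  | d, [] => d = 0
  | d, c :: rest =>
    if c = '(' then (if (d : Int) + 1 ≤ k then okFrom k (d + 1) rest else false)
    else if d = 0 then false else okFrom k (d - 1) rest

theorem foldl_count (p : List Char → Bool) (l : List (List Char)) (a : Int) :
    l.foldl (fun acc s => if p s then acc + 1 else acc) a = a + l.countP p := by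
  induction l generalizing a with
  | nil => simp
  | cons x xs ih =>
    simp only [List.foldl_cons, List.countP_cons, ih]
    by_cases h : p x <;> simp [h] <;> push_cast <;> ring

theorem maxLoop_ge (s : List Char) (st : List Char) (m : Nat) : m ≤ maxLoop s st m := by
  induction s generalizing st m with
  | nil => simp [maxLoop]
  | cons c rest ih =>
    simp only [maxLoop]
    split_ifs with h1 h2
    · exact le_trans (le_max_left _ _) (ih _ _)
    · exact ih _ _
    · exact ih _ _


theorem key (k : Int) (s : List Char) (hs : ∀ c ∈ s, c = '(' ∨ c = ')') :
    ∀ (st : List Char) (m : Nat), st.length ≤ m → (m : Int) ≤ k →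
    (balLoop s st && decide ((maxLoop s st m : Int) ≤ k)) = okFrom k st.length s := by
  induction s with
  | nil =>
    intro st m _ hm
    simp only [balLoop, maxLoop, okFrom]
    cases st <;> simp [hm]
  | cons c rest ih =>
    intro st m hstm hm
    have hc := hs c (by simp)
    have hrest : ∀ c ∈ rest, c = '(' ∨ c = ')' := fun x hx => hs x (by simp [hx])
    rcases hc with hc | hc <;> subst hc
    · simp only [balLoop, maxLoop, okFrom, reduceIte]
      by_cases hb : (st.length : Int) + 1 ≤ k
      · rw [if_pos hb]
        have hlen : ('(' :: st).length = st.length + 1 := rfl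
        rw [← hlen]
        exact ih hrest ('(' :: st) (max m (st.length + 1)) (by simpa [hlen] using le_max_right m (st.length + 1))
          (by rcases max_cases m (st.length + 1) with ⟨h, _⟩ | ⟨h, _⟩ <;> rw [h] <;> push_cast <;> omega)
      · rw [if_neg hb]
        have hge : (st.length + 1 : Nat) ≤ maxLoop rest ('(' :: st) (max m (st.length + 1)) :=
          le_trans (le_max_right _ _) (maxLoop_ge _ _ _)
        have hno : ¬ ((maxLoop rest ('(' :: st) (max m (st.length + 1)) : Int) ≤ k) := by
          push_cast at hge ⊢; omega
        simp [hno]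
    · simp only [balLoop, maxLoop, okFrom, reduceIte]
      cases st with
      | nil => simp [okFrom]
      | cons x t =>
        simp only [List.length_cons, List.tail_cons]
        have h1 : ¬ (t.length + 1 = 0) := by omega
        rw [if_neg h1]
        have h2 : t.length + 1 - 1 = t.length := by omega
        rw [h2]
        exact ih hrest t m (by simp at hstm; omega) hm

theorem prodRep_mem (i : Nat) (s : List Char) (hs : s ∈ prodRep i) : ∀ c ∈ s, c = '(' ∨ c = ')' := by
  induction i generalizing s with
  | zero => simp [prodRep] at hs; subst hs; simp
  | succ m ih =>
    simp [prodRep] at hs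
    rcases hs with ⟨t, ht, rfl⟩ | ⟨t, ht, rfl⟩ <;> intro c hc <;> simp at hc <;>
      rcases hc with rfl | hc
    · left; rfl
    · exact ih t ht c hc
    · right; rfl
    · exact ih t ht c hc

theorem countP_prod (k : Int) (i : Nat) : ∀ d, ((prodRep i).countP (okFrom k d) : Int) = Nk k i d := by
  induction i with
  | zero => intro d; by_cases h : d = 0 <;> simp [prodRep, Nk, okFrom, h]
  | succ m ih =>
    intro d
    simp only [prodRep, List.flatMap_cons, List.flatMap_nil, List.append_nil,
      List.countP_append, List.countP_map]
    have h1 : (prodRep m).countP ((okFrom k d) ∘ (fun s => '(' :: s)) =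
        if (d : Int) + 1 ≤ k then (prodRep m).countP (okFrom k (d + 1)) else 0 := by
      split_ifs with hb
      · apply List.countP_congr; intro s _; simp [Function.comp, okFrom, hb]
      · rw [List.countP_eq_zero]; intro s _; simp [Function.comp, okFrom, hb]
    have h2 : (prodRep m).countP ((okFrom k d) ∘ (fun s => ')' :: s)) =
        if 1 ≤ d then (prodRep m).countP (okFrom k (d - 1)) else 0 := by
      split_ifs with hb
      · apply List.countP_congr; intro s _
        simp [Function.comp, okFrom]
        intro h; omega
      · have hd : d = 0 := by omega
        rw [List.countP_eq_zero]; intro s _; simp [Function.comp, okFrom, hd]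
    rw [h1, h2]
    simp only [Nk]
    push_cast
    split_ifs <;> simp [ih] <;> push_cast <;> ring

theorem Nk_zero (k : Int) (i : Nat) : ∀ d, i < d → Nk k i d = 0 := by
  induction i with
  | zero => intro d h; simp [Nk]; omega
  | succ m ih =>
    intro d h
    simp only [Nk]
    rw [ih (d + 1) (by omega)]
    have : Nk k m (d - 1) = 0 := ih (d - 1) (by omega)
    simp [this]

theorem Nk_congr (i : Nat) : ∀ (d : Nat) (k k' : Int), (d : Int) + i ≤ 2 * k + 1 →
    (d : Int) + i ≤ 2 * k' + 1 → Nk k i d = Nk k' i d := by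
  induction i with
  | zero => intro d k k' _ _; simp [Nk]
  | succ m ih =>
    intro d k k' hk hk'
    simp only [Nk]
    congr 1
    · by_cases h1 : (d : Int) + 1 ≤ k <;> by_cases h2 : (d : Int) + 1 ≤ k'
      · rw [if_pos h1, if_pos h2]; exact ih (d + 1) k k' (by push_cast; omega) (by push_cast; omega)
      · rw [if_pos h1, if_neg h2, Nk_zero k m (d + 1) (by push_cast at hk' ⊢; omega)]
      · rw [if_neg h1, if_pos h2, Nk_zero k' m (d + 1) (by push_cast at hk ⊢; omega)]
      · rw [if_neg h1, if_neg h2]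
    · split_ifs with h
      · exact ih (d - 1) k k' (by push_cast; omega) (by push_cast; omega)
      · rfl

theorem getD_map_range (f : Nat → Int) (L j : Nat) :
    (((List.range L).map f).getD j 0) = if j < L then f j else 0 := by
  rcases lt_or_ge j L with h | h
  · rw [if_pos h, List.getD_eq_getElem?_getD]
    simp [List.getElem?_map, List.getElem?_range, h]
  · rw [if_neg (by omega), List.getD_eq_getElem?_getD]
    rw [List.getElem?_eq_none (by simpa using h)]
    rfl

theorem foldl_range_succ {A : Type} (f : A → Nat → A) (a : A) (n : Nat) :
    (List.range (n + 1)).foldl f a = f ((List.range n).foldl f a) n := by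
  rw [List.range_succ, List.foldl_append]; rfl

theorem dp_inv (mN : Nat) (j : Nat) :
    (List.range j).foldl
      (fun dp _ => (List.range (mN + 1)).map (fun d =>
        (if 1 ≤ d then dp.getD (d - 1) 0 else 0) +
        (if d + 1 ≤ mN then dp.getD (d + 1) 0 else 0)))
      ((List.range (mN + 1)).map (fun d => if d = 0 then 1 else 0))
    = (List.range (mN + 1)).map (fun d => Nk (mN : Int) j d) := by
  induction j with
  | zero =>
    simp only [List.range_zero, List.foldl_nil]
    apply List.map_congr_left; intro d _; simp [Nk]
  | succ m ih =>
    rw [foldl_range_succ, ih]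
    apply List.map_congr_left
    intro d hd
    simp only [List.mem_range] at hd
    rw [getD_map_range, getD_map_range]
    simp only [Nk]
    by_cases h1 : 1 ≤ d <;> by_cases hb : d + 1 ≤ mN
    · have hbi : (d : Int) + 1 ≤ (mN : Int) := by exact_mod_cast hb
      simp [h1, hb, hbi, show d - 1 < mN + 1 by omega, show d + 1 < mN + 1 by omega]; ring
    · have hbi : ¬ ((d : Int) + 1 ≤ (mN : Int)) := by push_cast; omega
      simp [h1, hb, hbi, show d - 1 < mN + 1 by omega]
    · have hbi : (d : Int) + 1 ≤ (mN : Int) := by exact_mod_cast hb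
      simp [h1, hb, hbi, show d + 1 < mN + 1 by omega]
    · have hbi : ¬ ((d : Int) + 1 ≤ (mN : Int)) := by push_cast; omega
      simp [h1, hb, hbi]

theorem count_eq_alt (n k : Int) (hn : 0 ≤ n) : count n k = count_alt n k := by
  unfold count count_alt
  rw [foldl_count, zero_add, if_neg (by omega : ¬ n < 0)]
  by_cases hk : k < 0
  · rw [if_pos hk]
    have hz : (prodRep n.toNat).countP
        (fun s => balLoop s [] && decide ((maxLoop s [] 0 : Int) ≤ k)) = 0 := by
      rw [List.countP_eq_zero]
      intro s _
      have h0 : ¬ ((maxLoop s [] 0 : Int) ≤ k) := by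
        have := Int.natCast_nonneg (maxLoop s [] 0); omega
      simp [h0]
    simp [hz]
  · rw [if_neg hk]
    simp only []
    have hcongr : (prodRep n.toNat).countP
        (fun s => balLoop s [] && decide ((maxLoop s [] 0 : Int) ≤ k))
        = (prodRep n.toNat).countP (okFrom k 0) := by
      apply List.countP_congr
      intro s hs
      have := key k s (prodRep_mem n.toNat s hs) [] 0 (by simp) (by push_cast; omega)
      simp only [List.length_nil] at this; rw [this]
    rw [hcongr, countP_prod k n.toNat 0]
    rw [dp_inv ((min k (n / 2)).toNat) n.toNat, getD_map_range]
    rw [if_pos (by omega)]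
    set mN := (min k (n / 2)).toNat with hmN
    have hmin : ((mN : Int)) = min k (n / 2) := by
      rw [hmN]; exact Int.toNat_of_nonneg (by omega)
    rcases le_or_gt k (n / 2) with hle | hgt
    · have : (mN : Int) = k := by rw [hmin]; omega
      rw [this]
    · have h1 : (mN : Int) = n / 2 := by rw [hmin]; omega
      apply Nk_congr
      · push_cast; omega
      · rw [h1]; push_cast; omega

-- ===== VERDICT (by name: the statement is the Claim_ definition above) =====
theorem count_spec : Claim_equal_count :=
  fun n k _ hn => count_eq_alt n k hn
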